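-- pv_equiv track=rewrite | github.com/Onurallp/Case-Algorithm | Task_2/process.py | sheep_jumps_to_next_stone
-- ===== SOURCE A (Python) =====
-- def sheep_jumps_to_next_stone(A, D):
--     total_distance = len(A)
--     if D >= total_distance:
--         return 0
--
--     max_time = max(time + i for i, time in enumerate(A))  # Calculate the maximum time when a stone will be out of the water.
--     stones_out_of_water = set()
--     stones_out_of_water.add(0)  # The first stone is always available
--
--     for time in range(1, max_time + 1):
--         max_jump = min(D, total_distance)  # Calculate the maximum jump the sheep can make
--         reachable_stones = set()
--
--         for stone in stones_out_of_water:
--             for jump in range(1, max_jump + 1):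
--                 next_position = stone + jump
--
--                 if next_position == total_distance - 1:
--                     return time
--
--                 if next_position < total_distance and A[next_position] <= time: # Check if the stone at next_position is out of the water at the current time
--                     reachable_stones.add(next_position) # if we add next pos. to the reachable_stone set, sheep can jump to it on the next iteration
--
--         stones_out_of_water = reachable_stones # update stones_out_of_water to include new reachable stones
--
--     return -1
-- ===== SOURCE B (Python) =====
-- def sheep_jumps_to_next_stone(A, D):
--     n = len(A)
--     if D >= n:
--         return 0
--     if D <= 0:
--         return -1
--     horizon = max(t + i for i, t in enumerate(A))
--     cur = [1 if p == 0 else 0 for p in range(n)]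
--     for time in range(1, horizon + 1):
--         # prefix counts of currently occupied stones: pref[i] = sum(cur[:i])
--         pref = [0]
--         for c in cur:
--             pref.append(pref[-1] + c)
--         # last stone is in jumping range iff the window [n-1-D, n-2] holds a stone
--         if pref[n - 1] - pref[max(0, n - 1 - D)] > 0:
--             return time
--         cur = [1 if 0 < p < n - 1 and A[p] <= time
--                     and pref[p] - pref[max(0, p - D)] > 0 else 0
--                for p in range(n)]
--     return -1
-- ===== Notes on version B (the rewrite author's own statement) =====
-- stated objective: alternative
-- what changed: A propagates a Python set of stones and, for every stone, tries every jump length 1..D; B keeps a 0/1 occupancy list, builds a prefix-count array once per time step, and decides each position's reachability with a single O(1) window subtraction pref[p]-pref[max(0,p-D)].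
import Mathlib
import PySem

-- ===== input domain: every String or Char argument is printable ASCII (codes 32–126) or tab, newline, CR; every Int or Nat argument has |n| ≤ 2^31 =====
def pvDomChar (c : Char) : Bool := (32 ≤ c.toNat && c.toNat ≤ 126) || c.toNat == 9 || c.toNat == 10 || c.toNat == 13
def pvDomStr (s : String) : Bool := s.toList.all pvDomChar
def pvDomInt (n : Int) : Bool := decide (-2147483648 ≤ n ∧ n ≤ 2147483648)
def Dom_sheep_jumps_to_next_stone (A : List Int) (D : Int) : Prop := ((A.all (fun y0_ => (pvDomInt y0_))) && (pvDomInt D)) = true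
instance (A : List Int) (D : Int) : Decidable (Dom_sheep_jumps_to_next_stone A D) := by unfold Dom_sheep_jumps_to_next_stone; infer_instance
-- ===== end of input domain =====

-- B replaces A's per-time push BFS over a Python set (each stone × each jump 1..D) by a 0/1
-- occupancy list with a prefix-count array per time step: each position's reachability is one
-- window subtraction pref[p]-pref[max(0,p-D)] > 0. Neither program mutates its arguments.

-- ===== PORT A =====
-- inner 'for jump in range(1, max_jump+1)' body; 'match acc.1' models Python's early 'return time'
def aInnerBody (A : List Int) (n time stone : Int) (acc : Option Int × PySem.Set Int) (jump : Int) :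
    Option Int × PySem.Set Int :=
  match acc.1 with
  | some _ => acc
  | none =>
    let np := stone + jump
    if np = n - 1 then (some time, acc.2)
    -- A[next_position] is guarded by 1 ≤ np < n, so pyGet? is some; .getD 0 is never used
    else if np < n ∧ (PySem.List.pyGet? A np).getD 0 ≤ time then (none, PySem.Set.add acc.2 np)
    else acc

-- one time step: 'reachable_stones = set()' then the double loop over stones and jumps
def aStep (A : List Int) (n maxJump time : Int) (stones : PySem.Set Int) : Option Int × PySem.Set Int :=
  stones.foldl
    (fun acc stone => (PySem.List.pyRange 1 (maxJump + 1) 1).foldl (aInnerBody A n time stone) acc)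
    (none, (PySem.Set.empty : PySem.Set Int))

def aOuterBody (A : List Int) (n D : Int) (st : Option Int × PySem.Set Int) (time : Int) :
    Option Int × PySem.Set Int :=
  match st.1 with
  | some _ => st
  | none => aStep A n (min D n) time st.2

def sheep_jumps_to_next_stone (A : List Int) (D : Int) : Int :=
  let n : Int := A.length
  if D ≥ n then 0
  else
    -- max(time + i for i, time in enumerate(A)); Python raises on empty A (excluded by Pre_), .getD 0 is never used inside Pre_
    let maxTime : Int := ((PySem.List.enumerate A 0).map (fun p => p.2 + p.1) |> (PySem.List.max? · (fun x => x))).getD 0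
    ((PySem.List.pyRange 1 (maxTime + 1) 1).foldl (aOuterBody A n D)
        ((none : Option Int), PySem.Set.add (PySem.Set.empty : PySem.Set Int) 0)).1.getD (-1)

-- ===== PORT B =====
-- pref = [0]; for c in cur: pref.append(pref[-1] + c)
def bPref (cur : List Int) : List Int :=
  cur.foldl (fun pr c => pr ++ [(PySem.List.pyGet? pr (-1)).getD 0 + c]) [0]

-- 'pref[p] - pref[max(0, p - D)] > 0'; indices are always in range, so .getD 0 is never used
def bWin (pref : List Int) (D p : Int) : Bool :=
  decide (0 < (PySem.List.pyGet? pref p).getD 0 - (PySem.List.pyGet? pref (max 0 (p - D))).getD 0)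

-- the list comprehension rebuilding cur
def bNext (A : List Int) (n D time : Int) (pref : List Int) : List Int :=
  (PySem.List.pyRange 0 n 1).map (fun p =>
    if 0 < p ∧ p < n - 1 ∧ (PySem.List.pyGet? A p).getD 0 ≤ time ∧ bWin pref D p = true then 1 else 0)

-- 'for time in range(1, horizon+1)' with its early return, as recursion on the list of times
def bLoop (A : List Int) (n D : Int) : List Int → List Int → Int
  | [], _ => -1
  | time :: ts, cur =>
    let pref := bPref cur
    if bWin pref D (n - 1) then time
    else bLoop A n D ts (bNext A n D time pref)

def sheep_jumps_to_next_stone_alt (A : List Int) (D : Int) : Int :=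
  let n : Int := A.length
  if D ≥ n then 0
  else if D ≤ 0 then -1
  else
    let horizon : Int := ((PySem.List.enumerate A 0).map (fun p => p.2 + p.1) |> (PySem.List.max? · (fun x => x))).getD 0
    bLoop A n D (PySem.List.pyRange 1 (horizon + 1) 1)
      ((PySem.List.pyRange 0 n 1).map (fun p => if p = 0 then (1 : Int) else 0))

-- ===== PRECONDITION & SPEC =====
-- Pre_ excludes only A = [] with D < 0, where Python A raises ValueError (max() of an empty sequence).
def Pre_sheep_jumps_to_next_stone (A : List Int) (D : Int) : Prop := A ≠ [] ∨ 0 ≤ D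
instance (A : List Int) (D : Int) : Decidable (Pre_sheep_jumps_to_next_stone A D) := by
  unfold Pre_sheep_jumps_to_next_stone; infer_instance
def pvWitness_sheep_jumps_to_next_stone : List Int × Int := ([0], 1)

def Spec_sheep_jumps_to_next_stone (A : List Int) (D : Int) (out : Int) : Prop :=
  out = sheep_jumps_to_next_stone_alt A D
instance (A : List Int) (D : Int) (out : Int) : Decidable (Spec_sheep_jumps_to_next_stone A D out) := by
  unfold Spec_sheep_jumps_to_next_stone; infer_instance

-- ===== CLAIM (what is proved, stated in full; the proofs are below) =====
def Claim_equal_sheep_jumps_to_next_stone : Prop :=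
  ∀ (A : List Int) (D : Int), Dom_sheep_jumps_to_next_stone A D →
    Pre_sheep_jumps_to_next_stone A D →
    Spec_sheep_jumps_to_next_stone A D (sheep_jumps_to_next_stone A D)

-- ===== LEMMAS AND PROOFS =====

-- ---- A side (characterising the set-BFS step) ----

-- once A's inner loop has "returned", it stays returned
lemma aInner_some (A : List Int) (n time stone t : Int) :
    ∀ (js : List Int) (s : PySem.Set Int),
      js.foldl (aInnerBody A n time stone) (some t, s) = (some t, s) := by
  intro js
  induction js with
  | nil => intro s; rfl
  | cons j js ih => intro s; simpa [aInnerBody] using ih s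

lemma aInner_hit (A : List Int) (n time stone : Int) :
    ∀ (js : List Int) (s : PySem.Set Int), (∃ j ∈ js, stone + j = n - 1) →
      (js.foldl (aInnerBody A n time stone) (none, s)).1 = some time := by
  intro js
  induction js with
  | nil => rintro s ⟨j, hj, _⟩; simp at hj
  | cons j js ih =>
    rintro s ⟨j', hj', hhit⟩
    rw [List.foldl_cons]
    by_cases h0 : stone + j = n - 1
    · simp only [aInnerBody, h0, if_pos]
      rw [aInner_some]
    · have hj'' : j' ∈ js := by
        rcases List.mem_cons.mp hj' with h | h
        · exact absurd (h ▸ hhit) h0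
        · exact h
      simp only [aInnerBody, h0, if_false]
      split
      · exact ih _ ⟨j', hj'', hhit⟩
      · exact ih _ ⟨j', hj'', hhit⟩

lemma aInner_nohit (A : List Int) (n time stone : Int) :
    ∀ (js : List Int) (s : PySem.Set Int), (∀ j ∈ js, stone + j ≠ n - 1) →
      (js.foldl (aInnerBody A n time stone) (none, s)).1 = none ∧
      (∀ x : Int, x ∈ (js.foldl (aInnerBody A n time stone) (none, s)).2 ↔
        x ∈ s ∨ ∃ j ∈ js, x = stone + j ∧ x < n ∧ (PySem.List.pyGet? A x).getD 0 ≤ time) := by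
  intro js
  induction js with
  | nil => intro s h; exact ⟨rfl, by simp⟩
  | cons j js ih =>
    intro s h
    have hj : stone + j ≠ n - 1 := h j (List.mem_cons_self ..)
    rw [List.foldl_cons]
    by_cases hc : stone + j < n ∧ (PySem.List.pyGet? A (stone + j)).getD 0 ≤ time
    · have hbody : aInnerBody A n time stone (none, s) j = (none, PySem.Set.add s (stone + j)) := by
        simp [aInnerBody, hj, hc]
      rw [hbody]
      obtain ⟨h1, h2⟩ := ih (PySem.Set.add s (stone + j)) (fun j' hj' => h j' (List.mem_cons_of_mem _ hj'))
      refine ⟨h1, fun x => ?_⟩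
      rw [h2, PySem.Set.mem_add]
      constructor
      · rintro ((hx | hx) | hx)
        · exact Or.inl hx
        · exact Or.inr ⟨j, List.mem_cons_self .., hx, hx ▸ hc⟩
        · rcases hx with ⟨j', hj', rest⟩; exact Or.inr ⟨j', List.mem_cons_of_mem _ hj', rest⟩
      · rintro (hx | ⟨j', hj', hxe, hxn, hxt⟩)
        · exact Or.inl (Or.inl hx)
        · rcases List.mem_cons.mp hj' with he | he
          · exact Or.inl (Or.inr (he ▸ hxe))
          · exact Or.inr ⟨j', he, hxe, hxn, hxt⟩
    · have hbody : aInnerBody A n time stone (none, s) j = (none, s) := by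
        simp only [aInnerBody, hj, if_false]
        split
        · next hh => exact absurd hh hc
        · rfl
      rw [hbody]
      obtain ⟨h1, h2⟩ := ih s (fun j' hj' => h j' (List.mem_cons_of_mem _ hj'))
      refine ⟨h1, fun x => ?_⟩
      rw [h2]
      constructor
      · rintro (hx | ⟨j', hj', rest⟩)
        · exact Or.inl hx
        · exact Or.inr ⟨j', List.mem_cons_of_mem _ hj', rest⟩
      · rintro (hx | ⟨j', hj', hxe, hxn, hxt⟩)
        · exact Or.inl hx
        · rcases List.mem_cons.mp hj' with he | he
          · exact absurd ⟨he ▸ hxe ▸ hxn, he ▸ hxe ▸ hxt⟩ hc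
          · exact Or.inr ⟨j', he, hxe, hxn, hxt⟩

-- the whole stone loop skips once returned
lemma aStepFold_some (A : List Int) (n mj time t : Int) :
    ∀ (ss : List Int) (s : PySem.Set Int),
      ss.foldl (fun acc stone => (PySem.List.pyRange 1 (mj + 1)).foldl (aInnerBody A n time stone) acc)
        (some t, s) = (some t, s) := by
  intro ss
  induction ss with
  | nil => intro s; rfl
  | cons s0 ss ih => intro s; rw [List.foldl_cons, aInner_some]; exact ih s

lemma aStep_hit (A : List Int) (n mj time : Int) :
    ∀ (ss : List Int) (s : PySem.Set Int),
      (∃ st ∈ ss, ∃ j : Int, 1 ≤ j ∧ j < mj + 1 ∧ st + j = n - 1) →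
      (ss.foldl (fun acc stone => (PySem.List.pyRange 1 (mj + 1)).foldl (aInnerBody A n time stone) acc)
        (none, s)).1 = some time := by
  intro ss
  induction ss with
  | nil => rintro s ⟨st, hst, _⟩; simp at hst
  | cons s0 ss ih =>
    rintro s ⟨st, hst, j, hj1, hj2, hhit⟩
    rw [List.foldl_cons]
    by_cases h0 : ∃ j ∈ PySem.List.pyRange 1 (mj + 1), s0 + j = n - 1
    · have h1 := aInner_hit A n time s0 (PySem.List.pyRange 1 (mj + 1)) s h0
      set F := (PySem.List.pyRange 1 (mj + 1)).foldl (aInnerBody A n time s0) (none, s) with hF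
      have : F = (some time, F.2) := by
        cases hFe : F with
        | mk o s2 => simp only [hFe] at h1 ⊢; rw [h1]
      rw [this, aStepFold_some]
    · rcases List.mem_cons.mp hst with he | he
      · exact absurd ⟨j, PySem.List.mem_pyRange_one.mpr ⟨hj1, hj2⟩, he ▸ hhit⟩ h0
      · have hn := aInner_nohit A n time s0 (PySem.List.pyRange 1 (mj + 1)) s
          (fun j' hj' hc => h0 ⟨j', hj', hc⟩)
        set F := (PySem.List.pyRange 1 (mj + 1)).foldl (aInnerBody A n time s0) (none, s) with hF
        have : F = (none, F.2) := by
          cases hFe : F with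
          | mk o s2 => simp only [hFe] at hn ⊢; rw [hn.1]
        rw [this]
        exact ih _ ⟨st, he, j, hj1, hj2, hhit⟩

lemma aStep_nohit (A : List Int) (n mj time : Int) :
    ∀ (ss : List Int) (s : PySem.Set Int),
      (∀ st ∈ ss, ∀ j : Int, 1 ≤ j → j < mj + 1 → st + j ≠ n - 1) →
      (ss.foldl (fun acc stone => (PySem.List.pyRange 1 (mj + 1)).foldl (aInnerBody A n time stone) acc)
        (none, s)).1 = none ∧
      (∀ x : Int, x ∈ (ss.foldl (fun acc stone => (PySem.List.pyRange 1 (mj + 1)).foldl (aInnerBody A n time stone) acc)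
        (none, s)).2 ↔
        x ∈ s ∨ ∃ st ∈ ss, ∃ j : Int, 1 ≤ j ∧ j < mj + 1 ∧ x = st + j ∧ x < n ∧
          (PySem.List.pyGet? A x).getD 0 ≤ time) := by
  intro ss
  induction ss with
  | nil => intro s h; exact ⟨rfl, by simp⟩
  | cons s0 ss ih =>
    intro s h
    rw [List.foldl_cons]
    have hn := aInner_nohit A n time s0 (PySem.List.pyRange 1 (mj + 1)) s
      (fun j hj => h s0 (List.mem_cons_self ..) j (PySem.List.mem_pyRange_one.mp hj).1 (PySem.List.mem_pyRange_one.mp hj).2)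
    set F := (PySem.List.pyRange 1 (mj + 1)).foldl (aInnerBody A n time s0) (none, s) with hF
    have hFe : F = (none, F.2) := by
      cases hFe : F with
      | mk o s2 => simp only [hFe] at hn ⊢; rw [hn.1]
    rw [hFe]
    obtain ⟨h1, h2⟩ := ih F.2 (fun st hst => h st (List.mem_cons_of_mem _ hst))
    refine ⟨h1, fun x => ?_⟩
    rw [h2, hn.2]
    constructor
    · rintro ((hx | ⟨j, hj, rest⟩) | ⟨st, hst, j, hj1, hj2, rest⟩)
      · exact Or.inl hx
      · exact Or.inr ⟨s0, List.mem_cons_self .., j, (PySem.List.mem_pyRange_one.mp hj).1,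
          (PySem.List.mem_pyRange_one.mp hj).2, rest⟩
      · exact Or.inr ⟨st, List.mem_cons_of_mem _ hst, j, hj1, hj2, rest⟩
    · rintro (hx | ⟨st, hst, j, hj1, hj2, rest⟩)
      · exact Or.inl (Or.inl hx)
      · rcases List.mem_cons.mp hst with he | he
        · exact Or.inl (Or.inr ⟨j, PySem.List.mem_pyRange_one.mpr ⟨hj1, hj2⟩, he ▸ rest⟩)
        · exact Or.inr ⟨st, he, j, hj1, hj2, rest⟩

-- skip lemma for A's outer time loop
lemma aOuter_some (A : List Int) (n D : Int) :
    ∀ (ts : List Int) (t : Int) (s : PySem.Set Int),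
      ts.foldl (aOuterBody A n D) (some t, s) = (some t, s) := by
  intro ts
  induction ts with
  | nil => intro t s; rfl
  | cons t0 ts ih => intro t s; rw [List.foldl_cons]; exact ih t s

-- A with a non-positive jump budget never returns a time
lemma aOuter_stuck (A : List Int) (n D : Int) (hD : min D n ≤ 0) :
    ∀ (ts : List Int) (S : PySem.Set Int),
      (ts.foldl (aOuterBody A n D) (none, S)).1 = none := by
  intro ts
  induction ts with
  | nil => intro S; rfl
  | cons t ts ih =>
    intro S
    rw [List.foldl_cons]
    have hr : PySem.List.pyRange 1 (min D n + 1) = [] := PySem.List.pyRange_one_eq_nil (by omega)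
    have : aOuterBody A n D (none, S) t = (none, PySem.Set.empty) := by
      show aStep A n (min D n) t S = _
      rw [aStep, hr]
      simp only [List.foldl_nil]
      induction S with
      | nil => rfl
      | cons s0 S ihS => exact ihS
    rw [this]
    exact ih PySem.Set.empty

-- ---- B side (characterising the prefix-count array) ----

-- clean partial sums used to describe bPref
def psums : List Int → Int → List Int
  | [], _ => []
  | c :: cs, s => (s + c) :: psums cs (s + c)

lemma bPref_fold (cur : List Int) :
    ∀ (pr : List Int) (x : Int),
      cur.foldl (fun pr c => pr ++ [(PySem.List.pyGet? pr (-1)).getD 0 + c]) (pr ++ [x])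
        = (pr ++ [x]) ++ psums cur x := by
  induction cur with
  | nil => intro pr x; simp [psums]
  | cons c cs ih =>
    intro pr x
    rw [List.foldl_cons]
    have hlast : (PySem.List.pyGet? (pr ++ [x]) (-1)).getD 0 = x := by
      rw [PySem.List.pyGet?_neg_one_append_singleton]; rfl
    rw [hlast]
    have h2 := ih (pr ++ [x]) (x + c)
    rw [h2]
    simp [psums]

lemma bPref_eq (cur : List Int) : bPref cur = 0 :: psums cur 0 := by
  have := bPref_fold cur [] 0
  simpa [bPref] using this

lemma psums_getElem? (cs : List Int) :
    ∀ (s : Int) (i : Nat), i < cs.length →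
      (psums cs s)[i]? = some (s + (cs.take (i + 1)).sum) := by
  induction cs with
  | nil => intro s i hi; simp at hi
  | cons c cs ih =>
    intro s i hi
    cases i with
    | zero => simp [psums]
    | succ j =>
      have hj : j < cs.length := by simpa using hi
      simp only [psums, List.getElem?_cons_succ]
      rw [ih (s + c) j hj]
      simp [add_assoc]

-- pref[i] is the number of occupied stones among cur[0:i]
lemma bPref_at (cur : List Int) (i : Int) (h0 : 0 ≤ i) (hn : i ≤ (cur.length : Int)) :
    (PySem.List.pyGet? (bPref cur) i).getD 0 = (cur.take i.toNat).sum := by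
  rw [PySem.List.pyGet?_of_nonneg _ h0, bPref_eq]
  cases hi : i.toNat with
  | zero => simp
  | succ j =>
    have hj : j < cur.length := by omega
    simp only [List.getElem?_cons_succ]
    rw [psums_getElem? cur 0 j hj]
    simp

-- a 0/1 list has positive sum iff it holds a 1
lemma sum01_pos (l : List Int) (h : ∀ x ∈ l, x = 0 ∨ x = 1) : 0 < l.sum ↔ (1 : Int) ∈ l := by
  induction l with
  | nil => simp
  | cons c cs ih =>
    have hnn : 0 ≤ cs.sum := List.sum_nonneg (fun x hx => by
      rcases h x (List.mem_cons_of_mem _ hx) with h0 | h1 <;> omega)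
    rcases h c (List.mem_cons_self ..) with hc | hc
    · simp [hc, ih (fun x hx => h x (List.mem_cons_of_mem _ hx))]
    · simp only [hc, List.sum_cons, List.mem_cons]
      constructor
      · intro _; left; trivial
      · intro _; omega

-- the window test in terms of the stone set S represented by cur
lemma win_iff (A : List Int) (D : Int) (S : PySem.Set Int) (cur : List Int)
    (hd : 1 ≤ D) (hlen : cur.length = A.length)
    (hinv : ∀ i : Nat, i < A.length → cur[i]? = some (if (i : Int) ∈ S then (1 : Int) else 0))
    (hS : ∀ s ∈ S, 0 ≤ s ∧ s < (A.length : Int))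
    (p : Int) (hp0 : 0 ≤ p) (hpn : p ≤ (A.length : Int)) :
    (bWin (bPref cur) D p = true) ↔ ∃ s ∈ S, p - D ≤ s ∧ s < p := by
  have h01 : ∀ x ∈ cur, x = 0 ∨ x = 1 := by
    intro x hx
    rw [List.mem_iff_getElem?] at hx
    obtain ⟨i, hi⟩ := hx
    have hilen : i < cur.length := (List.getElem?_eq_some_iff.mp hi).1
    rw [hinv i (by omega)] at hi
    rcases Option.some.inj hi with h
    split at h <;> omega
  set a : Int := max 0 (p - D) with ha
  have hap : a ≤ p := by omega
  unfold bWin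
  rw [decide_eq_true_iff]
  rw [bPref_at cur p hp0 (by omega), bPref_at cur a (by omega) (by omega)]
  have htk : cur.take p.toNat = cur.take a.toNat ++ (cur.drop a.toNat).take (p.toNat - a.toNat) := by
    conv_lhs => rw [show p.toNat = a.toNat + (p.toNat - a.toNat) by omega]
    rw [List.take_add]
  set seg := (cur.drop a.toNat).take (p.toNat - a.toNat) with hseg
  rw [htk, List.sum_append]
  have hsub : (cur.take a.toNat).sum + seg.sum - (cur.take a.toNat).sum = seg.sum := by ring
  rw [hsub]
  have hseg01 : ∀ x ∈ seg, x = 0 ∨ x = 1 := fun x hx =>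
    h01 x (List.mem_of_mem_drop (List.mem_of_mem_take hx))
  rw [sum01_pos seg hseg01, List.mem_iff_getElem?]
  constructor
  · rintro ⟨i, hi⟩
    rw [hseg, List.getElem?_take] at hi
    by_cases hlt : i < p.toNat - a.toNat
    · rw [if_pos hlt, List.getElem?_drop] at hi
      have hilen : a.toNat + i < cur.length := (List.getElem?_eq_some_iff.mp hi).1
      rw [hinv (a.toNat + i) (by omega)] at hi
      rcases Option.some.inj hi with h
      have hmem : ((a.toNat + i : Nat) : Int) ∈ S := by
        by_contra hc
        rw [if_neg hc] at h; omega
      exact ⟨((a.toNat + i : Nat) : Int), hmem, by push_cast; omega, by push_cast; omega⟩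
    · rw [if_neg hlt] at hi; exact absurd hi (by simp)
  · rintro ⟨s, hsS, hs1, hs2⟩
    obtain ⟨hs0, hsn⟩ := hS s hsS
    refine ⟨s.toNat - a.toNat, ?_⟩
    rw [hseg, List.getElem?_take, if_pos (by omega), List.getElem?_drop]
    have he : a.toNat + (s.toNat - a.toNat) = s.toNat := by omega
    rw [he, hinv s.toNat (by omega)]
    have : ((s.toNat : Nat) : Int) = s := by omega
    rw [this, if_pos hsS]

-- getElem? through 'map f (range(0, n))' for an Int bound n
lemma getElem?_map_pyRange_int {β : Type} (f : Int → β) (n : Int) (i : Nat) (hi : (i : Int) < n) :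
    ((PySem.List.pyRange 0 n).map f)[i]? = some (f (i : Int)) := by
  rw [List.getElem?_map, PySem.List.getElem?_pyRange_one, if_pos (by omega)]
  simp

-- indexing the rebuilt occupancy list
lemma bNext_getElem? (A : List Int) (n D time : Int) (pref : List Int) (i : Nat) (hi : (i : Int) < n) :
    (bNext A n D time pref)[i]? =
      some (if 0 < (i : Int) ∧ (i : Int) < n - 1 ∧ (PySem.List.pyGet? A (i : Int)).getD 0 ≤ time ∧
              bWin pref D (i : Int) = true then (1 : Int) else 0) := by
  unfold bNext
  exact getElem?_map_pyRange_int _ n i hi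

lemma bNext_length (A : List Int) (n D time : Int) (pref : List Int) (hn : 0 ≤ n) :
    (bNext A n D time pref).length = n.toNat := by
  unfold bNext
  rw [List.length_map, PySem.List.length_pyRange_one]
  omega

-- ---- one time step: A's set step and B's prefix-sweep step agree ----
lemma step_eq (A : List Int) (D time : Int) (S : PySem.Set Int) (cur : List Int)
    (hd1 : 1 ≤ D) (hdn : D < (A.length : Int)) (hlen : cur.length = A.length)
    (hS : ∀ s ∈ S, 0 ≤ s ∧ s < (A.length : Int))
    (hinv : ∀ i : Nat, i < A.length → cur[i]? = some (if (i : Int) ∈ S then (1 : Int) else 0)) :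
    ((aStep A (A.length : Int) D time S).1 =
        (if bWin (bPref cur) D ((A.length : Int) - 1) = true then some time else none)) ∧
    ((aStep A (A.length : Int) D time S).1 = none →
      (∀ x ∈ (aStep A (A.length : Int) D time S).2, 0 ≤ x ∧ x < (A.length : Int)) ∧
      (∀ i : Nat, i < A.length →
        (bNext A (A.length : Int) D time (bPref cur))[i]? =
          some (if (i : Int) ∈ (aStep A (A.length : Int) D time S).2 then (1 : Int) else 0))) := by
  set n : Int := (A.length : Int) with hn
  have hn2 : 2 ≤ n := by omega
  have hwin : ∀ p : Int, 0 ≤ p → p ≤ n →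
      ((bWin (bPref cur) D p = true) ↔ ∃ s ∈ S, p - D ≤ s ∧ s < p) :=
    fun p hp0 hpn => win_iff A D S cur hd1 hlen hinv hS p hp0 hpn
  have hhit_iff : (∃ st ∈ S, ∃ j : Int, 1 ≤ j ∧ j < D + 1 ∧ st + j = n - 1) ↔
      (bWin (bPref cur) D (n - 1) = true) := by
    rw [hwin (n - 1) (by omega) (by omega)]
    constructor
    · rintro ⟨st, hst, j, h1, h2, h3⟩; exact ⟨st, hst, by omega, by omega⟩
    · rintro ⟨s, hsS, h1, h2⟩; exact ⟨s, hsS, n - 1 - s, by omega, by omega, by omega⟩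
  by_cases hhit : ∃ st ∈ S, ∃ j : Int, 1 ≤ j ∧ j < D + 1 ∧ st + j = n - 1
  · have ha := aStep_hit A n D time S PySem.Set.empty hhit
    refine ⟨?_, ?_⟩
    · show (aStep A n D time S).1 = _
      unfold aStep
      rw [ha, if_pos (hhit_iff.mp hhit)]
    · intro hnone
      unfold aStep at hnone
      rw [ha] at hnone; exact absurd hnone (by simp)
  · obtain ⟨ha1, ha2⟩ := aStep_nohit A n D time S PySem.Set.empty
      (fun st hst j hj1 hj2 hj3 => hhit ⟨st, hst, j, hj1, hj2, hj3⟩)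
    have hbw : bWin (bPref cur) D (n - 1) = false := by
      rw [← Bool.not_eq_true]
      intro hc
      exact hhit (hhit_iff.mpr hc)
    refine ⟨?_, fun _ => ⟨?_, ?_⟩⟩
    · show (aStep A n D time S).1 = _
      unfold aStep; rw [ha1, hbw]; rfl
    · intro x hx
      unfold aStep at hx
      rw [ha2 x] at hx
      rcases hx with hx | ⟨st, hst, j, hj1, hj2, hje, hxn, _⟩
      · simp [PySem.Set.empty] at hx
      · obtain ⟨hst0, _⟩ := hS st hst
        exact ⟨by omega, hxn⟩
    · intro i hi
      rw [bNext_getElem? A n D time (bPref cur) i (by omega)]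
      congr 1
      have hmw : (i : Int) ∈ (aStep A n D time S).2 ↔
          ∃ st ∈ S, ∃ j : Int, 1 ≤ j ∧ j < D + 1 ∧ (i : Int) = st + j ∧ (i : Int) < n ∧
            (PySem.List.pyGet? A (i : Int)).getD 0 ≤ time := by
        unfold aStep
        rw [ha2 ((i : Int))]
        constructor
        · rintro (hx | hx)
          · simp [PySem.Set.empty] at hx
          · exact hx
        · exact Or.inr
      by_cases hc : 0 < (i : Int) ∧ (i : Int) < n - 1 ∧ (PySem.List.pyGet? A (i : Int)).getD 0 ≤ time ∧
          bWin (bPref cur) D (i : Int) = true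
      · obtain ⟨hi1, hi2, hA, hw⟩ := hc
        obtain ⟨s, hsS, hs1, hs2⟩ := (hwin (i : Int) (by omega) (by omega)).mp hw
        rw [if_pos ⟨hi1, hi2, hA, hw⟩,
          if_pos (hmw.mpr ⟨s, hsS, (i : Int) - s, by omega, by omega, by omega, by omega, hA⟩)]
      · rw [if_neg hc, if_neg ?_]
        intro hmem
        obtain ⟨st, hst, j, hj1, hj2, hje, hxn, hA⟩ := hmw.mp hmem
        obtain ⟨hst0, _⟩ := hS st hst
        have hine : (i : Int) ≠ n - 1 := by
          intro he
          exact hhit ⟨st, hst, j, hj1, hj2, by omega⟩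
        exact hc ⟨by omega, by omega, hA,
          (hwin (i : Int) (by omega) (by omega)).mpr ⟨st, hst, by omega, by omega⟩⟩

-- ---- the outer time loop: A's foldl with early-return state = B's recursion ----
lemma outer_eq (A : List Int) (D : Int) (hd1 : 1 ≤ D) (hdn : D < (A.length : Int)) :
    ∀ (ts : List Int) (S : PySem.Set Int) (cur : List Int),
      cur.length = A.length → (∀ s ∈ S, 0 ≤ s ∧ s < (A.length : Int)) →
      (∀ i : Nat, i < A.length → cur[i]? = some (if (i : Int) ∈ S then (1 : Int) else 0)) →
      (ts.foldl (aOuterBody A (A.length : Int) D) (none, S)).1.getD (-1) =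
        bLoop A (A.length : Int) D ts cur := by
  intro ts
  induction ts with
  | nil => intro S cur _ _ _; rfl
  | cons t ts ih =>
    intro S cur hlen hS hinv
    rw [List.foldl_cons]
    have hmin : min D ((A.length : Int)) = D := min_eq_left hdn.le
    have hA0 : aOuterBody A (A.length : Int) D (none, S) t = aStep A (A.length : Int) D t S := by
      show aStep A (A.length : Int) (min D ((A.length : Int))) t S = _
      rw [hmin]
    rw [hA0]
    obtain ⟨heq, hrest⟩ := step_eq A D t S cur hd1 hdn hlen hS hinv
    show _ = bLoop A (A.length : Int) D (t :: ts) cur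
    unfold bLoop
    by_cases hw : bWin (bPref cur) D ((A.length : Int) - 1) = true
    · rw [if_pos hw]
      rw [if_pos hw] at heq
      have hsa : aStep A (A.length : Int) D t S =
          (some t, (aStep A (A.length : Int) D t S).2) := by
        cases hFe : aStep A (A.length : Int) D t S with
        | mk o s2 => simp only [hFe] at heq ⊢; rw [heq]
      rw [hsa, aOuter_some]
      rfl
    · rw [if_neg hw]
      rw [if_neg hw] at heq
      have hsa : aStep A (A.length : Int) D t S =
          (none, (aStep A (A.length : Int) D t S).2) := by
        cases hFe : aStep A (A.length : Int) D t S with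
        | mk o s2 => simp only [hFe] at heq ⊢; rw [heq]
      obtain ⟨hbound, hco⟩ := hrest heq
      rw [hsa]
      exact ih (aStep A (A.length : Int) D t S).2 (bNext A (A.length : Int) D t (bPref cur))
        (by rw [bNext_length A _ D t _ (by omega)]; omega) hbound hco

-- ===== VERDICT (by name: the statement is the Claim_ definition above) =====
theorem sheep_jumps_to_next_stone_spec : Claim_equal_sheep_jumps_to_next_stone := by
  intro A D _ hpre
  unfold Spec_sheep_jumps_to_next_stone
  unfold sheep_jumps_to_next_stone sheep_jumps_to_next_stone_alt
  dsimp only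
  by_cases hge : D ≥ (A.length : Int)
  · simp only [hge, if_pos]
  · rw [if_neg hge, if_neg hge]
    by_cases hle : D ≤ 0
    · rw [if_pos hle]
      rw [aOuter_stuck A (A.length : Int) D (by omega)]
      rfl
    · rw [if_neg hle]
      have hd1 : 1 ≤ D := by omega
      have hdn : D < (A.length : Int) := by omega
      have hlen1 : 0 < A.length := by omega
      apply outer_eq A D hd1 hdn _ (PySem.Set.add PySem.Set.empty 0)
      · rw [List.length_map, PySem.List.length_pyRange_one]; omega
      · intro s hs
        have : s = 0 := by
          have : s ∈ PySem.Set.add PySem.Set.empty (0 : Int) := hs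
          rw [PySem.Set.mem_add] at this
          rcases this with h | h
          · simp [PySem.Set.empty] at h
          · exact h
        omega
      · intro i hi
        rw [getElem?_map_pyRange_int _ _ i (by omega)]
        simp [PySem.Set.empty]
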